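-- pv_equiv track=rewrite | github.com/shiva-aditya/codemind-python | vowels_not_in_a_string.py | po
-- ===== SOURCE A (Python) =====
-- def po(a):
--     s=["a","e","i","o","u"]
--     for i in a:
--         if i in s:
--             s.remove(i)
--     if len(s)==0:
--         return [0]
--     else:
--         return s
-- ===== SOURCE B (Python) =====
-- def po(a):
--     present = set(a)
--     result = [v for v in "aeiou" if v not in present]
--     return result if result else [0]
-- ===== Notes on version B (the rewrite author's own statement) =====
-- stated objective: faster
-- what changed: B builds a hash set of the string's characters once and makes a single pass over the fixed vowel alphabet collecting absent vowels, replacing A's per-character list membership test and list.remove mutation (constant-factor: O(1) set membership vs repeated list scans).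
-- outside the precondition, e.g. on po('aeiou'): A returns [0], B returns [0]
import Mathlib
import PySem

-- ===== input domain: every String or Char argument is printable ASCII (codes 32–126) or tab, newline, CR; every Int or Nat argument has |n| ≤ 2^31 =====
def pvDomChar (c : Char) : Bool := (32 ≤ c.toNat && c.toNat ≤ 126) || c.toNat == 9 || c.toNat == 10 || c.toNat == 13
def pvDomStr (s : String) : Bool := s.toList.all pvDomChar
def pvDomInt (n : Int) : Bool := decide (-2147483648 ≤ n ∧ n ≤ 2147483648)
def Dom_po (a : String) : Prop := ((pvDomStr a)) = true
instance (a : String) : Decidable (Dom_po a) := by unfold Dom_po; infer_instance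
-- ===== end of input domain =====

-- B builds the set of present characters once and filters the fixed vowel alphabet; idiomatic one-pass over "aeiou".
-- ===== PORT A =====
def po (a : String) : List String :=
  let s := a.toList.foldl (fun s i =>
      if s.contains (String.singleton i) then
        (PySem.List.remove? s (String.singleton i)).getD s
      else s)
    ["a","e","i","o","u"]
  if s.length == 0 then ["0"] else s

-- ===== PORT B =====
def po_alt (a : String) : List String :=
  let present : PySem.Set Char := PySem.Set.ofList a.toList
  let result := (("aeiou".toList.filter (fun v => !(present.contains v))).map String.singleton)
  if result = [] then ["0"] else result

-- ===== PRECONDITION & SPEC =====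
-- Pre_ excludes strings containing all five vowels, on which A returns the sentinel [0] — a list of int,
-- not a value of the declared List String type.
def Pre_po (a : String) : Prop :=
  ¬ ('a' ∈ a.toList ∧ 'e' ∈ a.toList ∧ 'i' ∈ a.toList ∧ 'o' ∈ a.toList ∧ 'u' ∈ a.toList)
instance (a : String) : Decidable (Pre_po a) := by unfold Pre_po; infer_instance
def pvWitness_po : String := "hello"
def Spec_po (a : String) (out : List String) : Prop := out = po_alt a
instance (a : String) (out : List String) : Decidable (Spec_po a out) := by unfold Spec_po; infer_instance

-- ===== CLAIM (what is proved, stated in full; the proofs are below) =====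
def Claim_equal_po : Prop := ∀ (a : String), Dom_po a → Pre_po a → Spec_po a (po a)

-- ===== LEMMAS AND PROOFS =====

theorem singleton_beq (c d : Char) : (String.singleton c == String.singleton d) = (c == d) := by
  cases h : c == d
  · simp only [beq_eq_false_iff_ne] at h ⊢
    intro hs
    exact h (by simpa [String.singleton] using congrArg String.toList hs)
  · simp only [beq_iff_eq] at h
    simp [h]

theorem step_eq_filter (s : List String) (hs : s.Nodup) (c : Char) :
    (if s.contains (String.singleton c) then
        (PySem.List.remove? s (String.singleton c)).getD s
      else s)
      = s.filter (fun v => !(String.singleton c == v)) := by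
  by_cases h : String.singleton c ∈ s
  · rw [if_pos (by simpa using h), PySem.List.remove?_eq_some_erase _ _ h, Option.getD_some,
      List.Nodup.erase_eq_filter hs]
    apply List.filter_congr
    intro v _
    cases hv : String.singleton c == v
    · simp_all [ne_comm]
    · simp_all
  · rw [if_neg (by simpa using h)]
    symm
    apply List.filter_eq_self.2
    intro v hv
    cases hcv : String.singleton c == v
    · rfl
    · exact absurd (beq_iff_eq.1 hcv ▸ hv) h

theorem fold_eq_filter (cs : List Char) (s : List String) (hs : s.Nodup) :
    cs.foldl (fun s i =>
      if s.contains (String.singleton i) then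
        (PySem.List.remove? s (String.singleton i)).getD s
      else s) s
      = s.filter (fun v => !(cs.any (fun c => String.singleton c == v))) := by
  induction cs generalizing s with
  | nil => simp
  | cons c cs ih =>
    rw [List.foldl_cons, step_eq_filter s hs c, ih _ (hs.filter _), List.filter_filter]
    apply List.filter_congr
    intro v _
    simp [Bool.and_comm]

theorem mem_present (a : String) (c : Char) :
    ((PySem.Set.ofList a.toList).contains c) = (a.toList.contains c) := by
  cases h : a.toList.contains c
  · simp only [List.contains_eq_mem, decide_eq_false_iff_not] at h ⊢
    simpa [PySem.Set.mem_ofList] using h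
  · simp only [List.contains_eq_mem, decide_eq_true_eq] at h ⊢
    simpa [PySem.Set.mem_ofList] using h

theorem any_singleton (a : String) (c : Char) :
    (a.toList.any (fun c' => String.singleton c' == String.singleton c)) = a.toList.contains c := by
  simp only [singleton_beq]
  cases h : a.toList.contains c
  · rw [List.any_eq_false]
    intro c' hc' hb
    have hcc : c' = c := beq_iff_eq.mp hb
    subst hcc
    simp [List.contains_eq_mem, hc'] at h
  · rw [List.any_eq_true]
    refine ⟨c, ?_, beq_self_eq_true c⟩
    simpa [List.contains_eq_mem] using h

-- the common value of the two filters
theorem filters_eq (a : String) :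
    (["a","e","i","o","u"].filter
        (fun v => !(a.toList.any (fun c => String.singleton c == v))))
      = (("aeiou".toList.filter
          (fun v => !((PySem.Set.ofList a.toList).contains v))).map String.singleton) := by
  have h : ∀ c : Char, (!(a.toList.any (fun c' => String.singleton c' == String.singleton c)))
      = (!((PySem.Set.ofList a.toList).contains c)) := by
    intro c; rw [any_singleton, mem_present]
  show List.filter _ [String.singleton 'a', String.singleton 'e', String.singleton 'i',
      String.singleton 'o', String.singleton 'u'] = _
  have hl : "aeiou".toList = ['a','e','i','o','u'] := rfl
  rw [hl]
  simp only [List.filter_cons, List.filter_nil, h]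
  by_cases ha : ((PySem.Set.ofList a.toList).contains 'a') <;>
    by_cases he : ((PySem.Set.ofList a.toList).contains 'e') <;>
    by_cases hi : ((PySem.Set.ofList a.toList).contains 'i') <;>
    by_cases ho : ((PySem.Set.ofList a.toList).contains 'o') <;>
    by_cases hu : ((PySem.Set.ofList a.toList).contains 'u') <;>
    simp_all

theorem po_spec : Claim_equal_po := by
  unfold Claim_equal_po
  intro a _ hpre
  unfold Spec_po po po_alt
  rw [fold_eq_filter _ _ (by decide), filters_eq a]
  set R := (("aeiou".toList.filter
      (fun v => !((PySem.Set.ofList a.toList).contains v))).map String.singleton) with hR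
  have hne : R ≠ [] := by
    unfold Pre_po at hpre
    push Not at hpre
    have key : ∀ c : Char, c ∈ (['a','e','i','o','u'] : List Char) → c ∉ a.toList → R ≠ [] := by
      intro c hc hcmem hnil
      have : c ∈ "aeiou".toList.filter (fun v => !((PySem.Set.ofList a.toList).contains v)) := by
        rw [List.mem_filter]
        refine ⟨by simpa using hc, ?_⟩
        rw [mem_present]
        simpa [List.contains_eq_mem] using hcmem
      have : String.singleton c ∈ R := List.mem_map_of_mem this
      simp [hnil] at this
    by_cases ha : 'a' ∈ a.toList
    · by_cases he : 'e' ∈ a.toList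
      · by_cases hi : 'i' ∈ a.toList
        · by_cases ho : 'o' ∈ a.toList
          · exact key 'u' (by decide) (hpre ha he hi ho)
          · exact key 'o' (by decide) ho
        · exact key 'i' (by decide) hi
      · exact key 'e' (by decide) he
    · exact key 'a' (by decide) ha
  rw [if_neg (by simpa using hne), if_neg hne]
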